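-- pv_equiv track=rewrite | github.com/ted92/bitcoin-mining-competition | src/utils/view.py | get_difficulty_from_hash
-- ===== SOURCE A (Python) =====
-- def get_difficulty_from_hash(hash):
--     """
--
--     :param hash:
--     :return:
--     """
--     diff = 0
--     for char in hash:
--         if char == '0':
--             diff += 1
--         else:
--             break
--     return diff
-- ===== SOURCE B (Python) =====
-- def get_difficulty_from_hash(hash):
--     # Binary search for the largest k such that the first k characters are all '0':
--     # the predicate hash[:k] == '0' * k is monotone (downward closed) in k.
--     lo, hi = 0, len(hash)
--     while lo < hi:
--         mid = (lo + hi + 1) // 2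
--         if hash[:mid] == '0' * mid:
--             lo = mid
--         else:
--             hi = mid - 1
--     return lo
-- ===== Notes on version B (the rewrite author's own statement) =====
-- stated objective: alternative
-- what changed: Replaces the left-to-right counting loop by a binary search on the prefix length, exploiting that 'the first k characters are all zeros' is a monotone predicate; each probe compares hash[:mid] against '0'*mid.
import Mathlib
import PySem

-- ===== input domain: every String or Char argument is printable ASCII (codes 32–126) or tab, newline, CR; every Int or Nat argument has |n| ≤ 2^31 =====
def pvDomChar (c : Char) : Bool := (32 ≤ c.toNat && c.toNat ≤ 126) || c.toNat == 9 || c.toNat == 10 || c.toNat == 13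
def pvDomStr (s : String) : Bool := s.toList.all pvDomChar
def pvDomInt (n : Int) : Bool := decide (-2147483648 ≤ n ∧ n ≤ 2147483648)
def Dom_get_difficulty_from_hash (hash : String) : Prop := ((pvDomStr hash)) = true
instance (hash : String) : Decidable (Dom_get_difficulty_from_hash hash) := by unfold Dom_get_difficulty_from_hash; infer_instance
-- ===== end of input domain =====

-- B replaces A's linear counting loop by a binary search on the prefix length (monotone predicate); same value, different algorithm.

-- ===== PORT A =====
-- the for/break loop over the characters, counter diff
def pvLoopA : List Char → Int → Int
  | [], diff => diff
  | c :: rest, diff => if c == '0' then pvLoopA rest (diff + 1) else diff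

def get_difficulty_from_hash (hash : String) : Int := pvLoopA hash.toList 0

-- ===== PORT B =====
-- hash[:mid] == '0' * mid  (mid is within 0..len, so the slice is List.take)
def pvCheckB (l : List Char) (k : Nat) : Bool := l.take k == List.replicate k '0'

-- the while-loop of Source B: lo, hi bounds, mid = (lo + hi + 1) // 2
def pvBSearch (l : List Char) (lo hi : Nat) : Nat :=
  if _h : lo < hi then
    if pvCheckB l ((lo + hi + 1) / 2) then pvBSearch l ((lo + hi + 1) / 2) hi
    else pvBSearch l lo ((lo + hi + 1) / 2 - 1)
  else lo
termination_by hi - lo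
decreasing_by
  · omega
  · omega

def get_difficulty_from_hash_alt (hash : String) : Int :=
  (pvBSearch hash.toList 0 hash.toList.length : Int)

-- ===== PRECONDITION & SPEC =====
def Spec_get_difficulty_from_hash (hash : String) (out : Int) : Prop := out = get_difficulty_from_hash_alt hash
instance (hash : String) (out : Int) : Decidable (Spec_get_difficulty_from_hash hash out) := by unfold Spec_get_difficulty_from_hash; infer_instance

-- ===== CLAIM (what is proved, stated in full; the proofs are below) =====
def Claim_equal_get_difficulty_from_hash : Prop := ∀ (hash : String), Dom_get_difficulty_from_hash hash → Spec_get_difficulty_from_hash hash (get_difficulty_from_hash hash)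

-- ===== LEMMAS AND PROOFS =====
theorem pvLoopA_eq_takeWhile (l : List Char) (d : Int) :
    pvLoopA l d = d + ((l.takeWhile (· == '0')).length : Int) := by
  induction l generalizing d with
  | nil => simp [pvLoopA]
  | cons c rest ih =>
    by_cases h : c == '0'
    · simp [pvLoopA, h, ih]
      omega
    · simp [pvLoopA, h]

-- the probe is true exactly on prefixes no longer than the run of leading zeros
theorem pvCheckB_iff (l : List Char) (k : Nat) (hk : k ≤ l.length) :
    pvCheckB l k = true ↔ k ≤ (l.takeWhile (· == '0')).length := by
  induction l generalizing k with
  | nil =>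
    have : k = 0 := by simpa using hk
    subst this; simp [pvCheckB]
  | cons c rest ih =>
    cases k with
    | zero => simp [pvCheckB]
    | succ k =>
      simp only [List.length_cons, Nat.succ_le_succ_iff] at hk
      by_cases h : c == '0'
      · have hc : c = '0' := by simpa using h
        have hrec := ih k hk
        simp only [pvCheckB, beq_iff_eq] at hrec ⊢
        simp [hc, List.replicate_succ, hrec]
      · have hc : ¬ c = '0' := by simpa using h
        simp [pvCheckB, List.replicate_succ, h]

theorem pvBSearch_eq (n : Nat) : ∀ (l : List Char) (lo hi : Nat),
    hi - lo ≤ n →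
    lo ≤ (l.takeWhile (· == '0')).length →
    (l.takeWhile (· == '0')).length ≤ hi →
    hi ≤ l.length →
    pvBSearch l lo hi = (l.takeWhile (· == '0')).length := by
  induction n with
  | zero =>
    intro l lo hi h0 h1 h2 h3
    rw [pvBSearch]
    have : ¬ lo < hi := by omega
    simp [this]; omega
  | succ n ih =>
    intro l lo hi h0 h1 h2 h3
    rw [pvBSearch]
    by_cases hlt : lo < hi
    · simp only [hlt, dif_pos]
      set mid := (lo + hi + 1) / 2 with hmid
      have hbnd : lo < mid ∧ mid ≤ hi := by constructor <;> omega
      by_cases hc : pvCheckB l mid = true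
      · have : mid ≤ (l.takeWhile (· == '0')).length :=
          (pvCheckB_iff l mid (by omega)).mp hc
        simp only [hc, if_pos]
        exact ih l mid hi (by omega) this h2 h3
      · have : ¬ mid ≤ (l.takeWhile (· == '0')).length := fun hle =>
          hc ((pvCheckB_iff l mid (by omega)).mpr hle)
        simp only [hc, if_neg, Bool.false_eq_true, not_false_eq_true]
        exact ih l lo (mid - 1) (by omega) h1 (by omega) (by omega)
    · simp [hlt]; omega

-- ===== VERDICT (by name: the statement is the Claim_ definition above) =====
theorem get_difficulty_from_hash_spec : Claim_equal_get_difficulty_from_hash := by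
  intro hash _
  unfold Spec_get_difficulty_from_hash get_difficulty_from_hash get_difficulty_from_hash_alt
  rw [pvLoopA_eq_takeWhile,
    pvBSearch_eq hash.toList.length hash.toList 0 hash.toList.length
      (by omega) (by omega) (by
        simpa using (List.takeWhile_sublist (l := hash.toList) (p := (· == '0'))).length_le) (le_refl _)]
  omega
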